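-- pv_equiv track=rewrite | github.com/novoseltcev/miet-industrial-programming | lab1/result.py | _find_matrix_down_boundary
-- ===== SOURCE A (Python) =====
-- def get_matrix_size(matrix: list[list]) -> tuple[int, int]:
--     return len(matrix), len(matrix[0])
--
-- def _find_matrix_down_boundary(matrix: list[list]) -> int:
--     n_rows, n_columns = get_matrix_size(matrix)
--     result = 0
--     for row_num in range(n_rows - 1, -1, -1):
--         if matrix[row_num].count(0) != n_columns:
--             result = row_num
--             break
--     return result + 1
-- ===== SOURCE B (Python) =====
-- def get_matrix_size(matrix: list[list]) -> tuple[int, int]: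
--     return len(matrix), len(matrix[0])
--
--
-- def _find_matrix_down_boundary(matrix: list[list]) -> int:
--     n_rows, n_columns = get_matrix_size(matrix)
--     nonzero = [i for i in range(n_rows) if matrix[i].count(0) != n_columns]
--     return max(nonzero) + 1 if nonzero else 1
-- ===== Notes on version B (the rewrite author's own statement) =====
-- stated objective: simpler
-- what changed: Replaces the bottom-up reverse scan with early break and a leftover-state accumulator by a top-down comprehension of non-all-zero row indices reduced with max (or 1 if none).
import Mathlib
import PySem

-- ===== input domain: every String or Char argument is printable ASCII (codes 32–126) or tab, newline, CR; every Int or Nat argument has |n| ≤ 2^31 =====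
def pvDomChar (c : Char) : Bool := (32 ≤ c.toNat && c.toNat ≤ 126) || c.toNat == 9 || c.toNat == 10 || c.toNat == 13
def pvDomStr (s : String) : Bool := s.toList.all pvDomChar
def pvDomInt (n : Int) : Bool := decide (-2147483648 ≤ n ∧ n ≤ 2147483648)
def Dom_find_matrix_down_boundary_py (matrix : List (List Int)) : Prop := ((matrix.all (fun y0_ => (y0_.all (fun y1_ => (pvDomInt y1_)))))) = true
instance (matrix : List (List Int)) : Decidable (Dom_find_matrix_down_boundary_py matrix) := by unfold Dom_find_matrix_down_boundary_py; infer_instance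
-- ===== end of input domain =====

-- B replaces A's bottom-up reverse scan with early break by a top-down list of
-- non-all-zero row indices reduced with max (objective: simpler decomposition).

-- ===== PORT A =====
-- the reverse for-loop with break: first index i (scanning the given index list)
-- whose row is not all zeros, else the leftover accumulator `result`
def pvLoopA (matrix : List (List Int)) (ncols : Int) : List Int → Int → Int
  | [], result => result
  | i :: rest, result =>
    if ((PySem.List.count (PySem.List.pyGetD matrix i []) (0 : Int) : Int) ≠ ncols) then i
    else pvLoopA matrix ncols rest result

def find_matrix_down_boundary_py (matrix : List (List Int)) : Int :=
  match matrix with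
  | [] => 0   -- unreachable under Pre_: Python raises IndexError on len(matrix[0])
  | row0 :: _ =>
    let n_rows : Int := PySem.List.len matrix
    let n_columns : Int := PySem.List.len row0
    let result := pvLoopA matrix n_columns (PySem.List.pyRange (n_rows - 1) (-1) (-1)) 0
    result + 1

-- ===== PORT B =====
def find_matrix_down_boundary_py_alt (matrix : List (List Int)) : Int :=
  match matrix with
  | [] => 0   -- unreachable under Pre_: Python raises IndexError on len(matrix[0])
  | row0 :: _ =>
    let n_rows : Int := PySem.List.len matrix
    let n_columns : Int := PySem.List.len row0
    let nonzero := (PySem.List.pyRange 0 n_rows 1).filter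
        (fun i => decide ((PySem.List.count (PySem.List.pyGetD matrix i []) (0 : Int) : Int) ≠ n_columns))
    match PySem.List.max? nonzero (fun y => y) with
    | none => 1
    | some m => m + 1

-- ===== PRECONDITION & SPEC =====
-- Pre_ excludes only the empty matrix, on which A raises IndexError (matrix[0]).
def Pre_find_matrix_down_boundary_py (matrix : List (List Int)) : Prop := matrix ≠ []
instance (matrix : List (List Int)) : Decidable (Pre_find_matrix_down_boundary_py matrix) := by unfold Pre_find_matrix_down_boundary_py; infer_instance
def pvWitness_find_matrix_down_boundary_py : List (List Int) := [[0, 1], [0, 0]]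
def Spec_find_matrix_down_boundary_py (matrix : List (List Int)) (out : Int) : Prop := out = find_matrix_down_boundary_py_alt matrix
instance (matrix : List (List Int)) (out : Int) : Decidable (Spec_find_matrix_down_boundary_py matrix out) := by unfold Spec_find_matrix_down_boundary_py; infer_instance

-- ===== CLAIM (what is proved, stated in full; the proofs are below) =====
def Claim_equal_find_matrix_down_boundary_py : Prop := ∀ (matrix : List (List Int)), Dom_find_matrix_down_boundary_py matrix → Pre_find_matrix_down_boundary_py matrix → Spec_find_matrix_down_boundary_py matrix (find_matrix_down_boundary_py matrix)

-- ===== LEMMAS AND PROOFS =====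

theorem foldl_max_lt {a x : Int} {t : List Int} (ha : a < x) (h : ∀ y ∈ t, y < x) :
    List.foldl max a t < x := by
  induction t generalizing a with
  | nil => exact ha
  | cons b t ih =>
    exact ih (max_lt ha (h b (by simp))) (fun y hy => h y (by simp [hy]))

theorem max?_append_singleton_of_lt (l : List Int) (x : Int) (h : ∀ y ∈ l, y < x) :
    PySem.List.max? (l ++ [x]) (fun y => y) = some x := by
  cases l with
  | nil => simp [PySem.List.max?_id_cons]
  | cons a t =>
    rw [List.cons_append, PySem.List.max?_id_cons]
    have : List.foldl max a (t ++ [x]) = x := by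
      rw [List.foldl_append]
      simp only [List.foldl_cons, List.foldl_nil]
      exact max_eq_right (le_of_lt (foldl_max_lt (h a (by simp))
        (fun y hy => h y (by simp [hy]))))
    rw [this]

-- the core equivalence: A's countdown-with-break loop vs B's filter-and-max,
-- for the first n rows, any matrix and column count
theorem loop_eq_filter_max (matrix : List (List Int)) (c : Int) (n : Nat) :
    pvLoopA matrix c (PySem.List.pyRange ((n : Int) - 1) (-1) (-1)) 0 + 1 =
      (match PySem.List.max? ((PySem.List.pyRange 0 (n : Int) 1).filter
          (fun i => decide ((PySem.List.count (PySem.List.pyGetD matrix i []) (0 : Int) : Int) ≠ c)))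
          (fun y => y) with
        | none => 1
        | some m => m + 1) := by
  induction n with
  | zero =>
    rw [PySem.List.pyRange_neg_one_eq_nil (by norm_num),
        PySem.List.pyRange_one_eq_nil (by norm_num)]
    simp [pvLoopA, PySem.List.max?]
  | succ n ih =>
    have h1 : ((n + 1 : Nat) : Int) - 1 = (n : Int) := by push_cast; ring
    have h2 : ((n + 1 : Nat) : Int) = (n : Int) + 1 := by push_cast; ring
    rw [h1, h2, PySem.List.pyRange_neg_one_cons (by omega),
        PySem.List.pyRange_one_succ_right (by omega), List.filter_append]
    by_cases hp : ((PySem.List.count (PySem.List.pyGetD matrix (n : Int) []) (0 : Int) : Int) ≠ c)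
    · simp only [pvLoopA, if_pos hp, List.filter_cons, List.filter_nil, decide_eq_true hp, if_true]
      rw [max?_append_singleton_of_lt _ _ (fun y hy => by
        have := PySem.List.mem_pyRange_one.mp (List.mem_of_mem_filter hy)
        omega)]
    · simp only [pvLoopA, if_neg hp, List.filter_cons, List.filter_nil]
      rw [decide_eq_false hp]
      simpa using ih

-- ===== VERDICT (by name: the statement is the Claim_ definition above) =====
theorem find_matrix_down_boundary_py_spec : Claim_equal_find_matrix_down_boundary_py := by
  intro matrix _ hpre
  unfold Spec_find_matrix_down_boundary_py find_matrix_down_boundary_py find_matrix_down_boundary_py_alt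
  cases matrix with
  | nil => exact absurd rfl hpre
  | cons row0 rest =>
    simp only [PySem.List.len_eq]
    exact loop_eq_filter_max (row0 :: rest) (row0.length : Int) (row0 :: rest).length
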